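-- pv_equiv track=rewrite | github.com/alesxxxx/Ue-offset-dumper | src/engines/ue/sdk_walker.py | _ctz8
-- ===== SOURCE A (Python) =====
-- def _ctz8(value: int) -> int:
--     value &= 0xFF
--     if value == 0:
--         return -1
--     idx = 0
--     while value and (value & 1) == 0:
--         value >>= 1
--         idx += 1
--     return idx
-- ===== SOURCE B (Python) =====
-- def _ctz8(value: int) -> int:
--     value &= 0xFF
--     if value == 0:
--         return -1
--     return (value & -value).bit_length() - 1
-- ===== Notes on version B (the rewrite author's own statement) =====
-- stated objective: idiomatic
-- what changed: Replaces the shift-and-count loop with the closed-form bit trick (value & -value).bit_length() - 1, which isolates the lowest set bit and reads its index directly; no loop or accumulator.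
import Mathlib
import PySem

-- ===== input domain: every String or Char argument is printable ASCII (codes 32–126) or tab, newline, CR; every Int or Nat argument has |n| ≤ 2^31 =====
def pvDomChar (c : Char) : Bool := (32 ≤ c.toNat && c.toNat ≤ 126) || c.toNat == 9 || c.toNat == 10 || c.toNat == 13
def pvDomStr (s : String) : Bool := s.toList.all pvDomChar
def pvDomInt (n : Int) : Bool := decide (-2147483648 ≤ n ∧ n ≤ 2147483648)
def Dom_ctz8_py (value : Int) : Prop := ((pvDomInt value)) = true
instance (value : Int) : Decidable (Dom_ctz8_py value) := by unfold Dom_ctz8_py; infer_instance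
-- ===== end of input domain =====

-- B replaces A's shift-and-count loop by the closed form (value & -value).bit_length() - 1 (more idiomatic, no loop).


-- ===== PORT A =====
-- the while loop of A; after `value &= 0xFF` the value is a Nat < 256, so the loop
-- runs at most 8 times and fuel 8 makes the same iterations (fuel is never exhausted)
def ctzLoopA (fuel : Nat) (value : Nat) (idx : Int) : Int :=
  match fuel with
  | 0 => idx
  | f + 1 =>
    if value ≠ 0 ∧ value &&& 1 = 0 then ctzLoopA f (value >>> 1) (idx + 1) else idx

def ctz8_py (value : Int) : Int :=
  let value := PySem.Int.band value 255   -- value &= 0xFF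
  if value = 0 then -1
  else ctzLoopA 8 value.toNat 0           -- idx = 0; while value and (value & 1) == 0: …

-- ===== PORT B =====
def ctz8_py_alt (value : Int) : Int :=
  let value := PySem.Int.band value 255   -- value &= 0xFF
  if value = 0 then -1
  else ((PySem.Int.bitLength (PySem.Int.band value (-value)) : Nat) : Int) - 1

-- ===== PRECONDITION & SPEC =====
def Spec_ctz8_py (value : Int) (out : Int) : Prop := out = ctz8_py_alt value
instance (value : Int) (out : Int) : Decidable (Spec_ctz8_py value out) := by unfold Spec_ctz8_py; infer_instance

-- ===== CLAIM (what is proved, stated in full; the proofs are below) =====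
def Claim_equal_ctz8_py : Prop := ∀ (value : Int), Dom_ctz8_py value → Spec_ctz8_py value (ctz8_py value)

-- ===== LEMMAS AND PROOFS =====
theorem band255_bounds (v : Int) :
    0 ≤ PySem.Int.band v 255 ∧ PySem.Int.band v 255 < 256 := by
  unfold PySem.Int.band
  by_cases h : 0 ≤ v
  · rw [if_pos h, if_pos (by norm_num : (0:Int) ≤ 255)]
    have hh : v.toNat &&& (255:Int).toNat ≤ 255 := by
      rw [(rfl : (255:Int).toNat = 255)]; exact Nat.and_le_right
    omega
  · rw [if_neg h, if_pos (by norm_num : (0:Int) ≤ 255)]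
    have hh : (255:Int).toNat - ((255:Int).toNat &&& (-v - 1).toNat) ≤ 255 := by
      rw [(rfl : (255:Int).toNat = 255)]; exact Nat.sub_le _ _
    omega

set_option maxRecDepth 8192 in
theorem ctz8_key : ∀ n : Nat, n < 256 →
    (if (n : Int) = 0 then (-1 : Int) else ctzLoopA 8 n 0) =
    (if (n : Int) = 0 then (-1 : Int)
     else ((PySem.Int.bitLength (PySem.Int.band (n : Int) (-(n : Int))) : Nat) : Int) - 1) := by
  decide

-- ===== VERDICT (by name: the statement is the Claim_ definition above) =====
theorem ctz8_py_spec : Claim_equal_ctz8_py := by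
  intro value _
  unfold Spec_ctz8_py ctz8_py ctz8_py_alt
  have hb := band255_bounds value
  set m := PySem.Int.band value 255 with hm
  have hcast : m = ((m.toNat : Nat) : Int) := (Int.toNat_of_nonneg hb.1).symm
  have hn : m.toNat < 256 := by omega
  have := ctz8_key m.toNat hn
  rw [hcast]
  simp only [Int.toNat_natCast]
  exact this
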